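-- pv_equiv track=rewrite | github.com/Salmonwastaken/codewars-solutions | 4-kyu/range-extraction/range_extraction.py | solution
-- ===== SOURCE A (Python) =====
-- from itertools import groupby, count
--
-- def solution(args):
--     def rangify(iterable):
--         groups = list(iterable)
--         if len(groups) > 2:
--             return f"{groups[0]}-{groups[-1]}"
--         if len(groups) > 1:
--             return f"{groups[0]},{groups[-1]}"
--         else:
--             return f"{groups[0]}"
--     return ','.join(rangify(g) for _, g in groupby(args, key=lambda n, c=count(): n-next(c)))
-- ===== SOURCE B (Python) =====
-- def solution(args):
--     xs = list(args)
--     n = len(xs)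
--     starts = [i for i in range(n) if i == 0 or xs[i] != xs[i - 1] + 1]
--     ends = [i for i in range(n) if i == n - 1 or xs[i + 1] != xs[i] + 1]
--     parts = []
--     for a, b in zip(starts, ends):
--         if b - a > 1:
--             parts.append(f"{xs[a]}-{xs[b]}")
--         elif b - a == 1:
--             parts.append(f"{xs[a]},{xs[b]}")
--         else:
--             parts.append(f"{xs[a]}")
--     return ",".join(parts)
-- ===== Notes on version B (the rewrite author's own statement) =====
-- stated objective: alternative
-- what changed: Replaces the sequential groupby-with-count() key trick by a staged, stateless computation: run-start indices and run-end indices are found by two independent comprehensions over range(n), paired positionally with zip, and each run is formatted from its boundary indices by index distance.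
import Mathlib
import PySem

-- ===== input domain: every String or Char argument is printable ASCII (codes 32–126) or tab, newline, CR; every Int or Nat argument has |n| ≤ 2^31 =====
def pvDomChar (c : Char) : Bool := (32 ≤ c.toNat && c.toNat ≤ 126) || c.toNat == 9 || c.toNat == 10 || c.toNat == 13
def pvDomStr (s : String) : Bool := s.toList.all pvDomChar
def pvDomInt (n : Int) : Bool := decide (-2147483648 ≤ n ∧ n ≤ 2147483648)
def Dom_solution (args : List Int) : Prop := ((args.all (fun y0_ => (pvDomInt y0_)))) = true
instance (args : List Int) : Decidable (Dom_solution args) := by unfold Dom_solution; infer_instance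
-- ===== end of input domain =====

-- B replaces A's sequential groupby-with-counter pass by a staged, stateless computation:
-- run-start indices and run-end indices are found by two independent comprehensions over
-- range(n), paired with zip, and each run is formatted from its boundary indices
-- (objective: alternative algorithm, same O(n) cost).

-- ===== PORT A =====
-- A pairs each element with the key n - index (the count() trick), groups consecutive
-- equal keys (itertools.groupby, transliterated as keyedFrom + groupAuxA), and formats
-- each group with rangifyA.
def rangifyA (groups : List Int) : String :=
  -- groups produced by groupby are always nonempty, so groups[0]/groups[-1] are
  -- ported as headD 0 / getLastD 0 (exact on every nonempty list).
  if groups.length > 2 then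
    PySem.Int.toStr (groups.headD 0) ++ "-" ++ PySem.Int.toStr (groups.getLastD 0)
  else if groups.length > 1 then
    PySem.Int.toStr (groups.headD 0) ++ "," ++ PySem.Int.toStr (groups.getLastD 0)
  else
    PySem.Int.toStr (groups.headD 0)

-- key(n) = n - next(c): pair each element with n - index
def keyedFrom (i : Int) : List Int → List (Int × Int)
  | [] => []
  | n :: rest => (n - i, n) :: keyedFrom (i + 1) rest

-- itertools.groupby: collect maximal blocks of consecutive equal keys
def groupAuxA (k : Int) (cur : List Int) : List (Int × Int) → List (List Int)
  | [] => [cur.reverse]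
  | (k', n) :: rest =>
      if k' == k then groupAuxA k (n :: cur) rest
      else cur.reverse :: groupAuxA k' [n] rest

def solution (args : List Int) : String :=
  match keyedFrom 0 args with
  | [] => ""
  | (k, n) :: rest => PySem.Str.join "," ((groupAuxA k [n] rest).map rangifyA)

-- ===== PORT B =====
-- [i for i in range(n) if i == 0 or xs[i] != xs[i - 1] + 1] — every xs[...] index that is
-- actually evaluated lies in range, so pyGetD is exact (Python's `or` short-circuits; the
-- Bool || below has the same value since its left operand is true exactly there).
def predSB (xs : List Int) (i : Int) : Bool :=
  i == 0 || !(PySem.List.pyGetD xs i 0 == PySem.List.pyGetD xs (i - 1) 0 + 1)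

-- [i for i in range(n) if i == n - 1 or xs[i + 1] != xs[i] + 1]
def predEB (xs : List Int) (i : Int) : Bool :=
  i == (xs.length : Int) - 1 || !(PySem.List.pyGetD xs (i + 1) 0 == PySem.List.pyGetD xs i 0 + 1)

-- the if/elif/else that formats one run from its boundary indices a, b
def fmtBI (xs : List Int) (a b : Int) : String :=
  if b - a > 1 then
    PySem.Int.toStr (PySem.List.pyGetD xs a 0) ++ "-" ++ PySem.Int.toStr (PySem.List.pyGetD xs b 0)
  else if b - a = 1 then
    PySem.Int.toStr (PySem.List.pyGetD xs a 0) ++ "," ++ PySem.Int.toStr (PySem.List.pyGetD xs b 0)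
  else
    PySem.Int.toStr (PySem.List.pyGetD xs a 0)

def solution_alt (args : List Int) : String :=
  let n : Int := args.length
  let starts := (PySem.List.pyRange 0 n 1).filter (predSB args)
  let ends := (PySem.List.pyRange 0 n 1).filter (predEB args)
  let parts := (starts.zip ends).foldl (fun ps ab => ps ++ [fmtBI args ab.1 ab.2]) []
  PySem.Str.join "," parts

-- ===== PRECONDITION & SPEC =====
def Spec_solution (args : List Int) (out : String) : Prop := out = solution_alt args
instance (args : List Int) (out : String) : Decidable (Spec_solution args out) := by unfold Spec_solution; infer_instance

-- ===== CLAIM (what is proved, stated in full; the proofs are below) =====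
def Claim_equal_solution : Prop := ∀ (args : List Int), Dom_solution args → Spec_solution args (solution args)

-- ===== LEMMAS AND PROOFS =====

-- ---- the runs decomposition both programs compute ----

-- maximal consecutive extension of p at the front of the list, and the rest
def firstRun (p : Int) : List Int → List Int × List Int
  | [] => ([], [])
  | n :: rest =>
      if n = p + 1 then ((n :: (firstRun n rest).1, (firstRun n rest).2) : List Int × List Int)
      else ([], n :: rest)

theorem firstRun_rest_length (l : List Int) : ∀ p, (firstRun p l).2.length ≤ l.length := by
  induction l with
  | nil => intro p; simp [firstRun]
  | cons n rest ih =>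
      intro p
      simp only [firstRun]
      split_ifs with h
      · exact le_trans (ih n) (by simp)
      · simp

def runsOf : List Int → List (List Int)
  | [] => []
  | x :: xs => (x :: (firstRun x xs).1) :: runsOf (firstRun x xs).2
  termination_by l => l.length
  decreasing_by
    have := firstRun_rest_length xs x
    simp
    omega

theorem firstRun_append (l : List Int) : ∀ p, (firstRun p l).1 ++ (firstRun p l).2 = l := by
  induction l with
  | nil => intro p; simp [firstRun]
  | cons n rest ih =>
      intro p
      simp only [firstRun]
      split_ifs with h
      · simpa using ih n
      · simp

theorem firstRun_get (l : List Int) : ∀ p j, j < (firstRun p l).1.length →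
    (firstRun p l).1.getD j 0 = p + 1 + (j : Int) := by
  induction l with
  | nil => intro p j hj; simp [firstRun] at hj
  | cons n rest ih =>
      intro p j hj
      by_cases h : n = p + 1
      · simp only [firstRun, if_pos h] at hj ⊢
        cases j with
        | zero => simpa using h
        | succ k =>
            simp only [List.length_cons] at hj
            simp only [List.getD_cons_succ]
            rw [ih n k (by omega), h]
            push_cast
            ring
      · simp [firstRun, if_neg h] at hj

theorem firstRun_bound (l : List Int) : ∀ p, (firstRun p l).2 ≠ [] →
    (firstRun p l).2.getD 0 0 ≠ p + 1 + ((firstRun p l).1.length : Int) := by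
  induction l with
  | nil => intro p h; simp [firstRun] at h
  | cons n rest ih =>
      intro p h
      by_cases hn : n = p + 1
      · simp only [firstRun, if_pos hn] at h ⊢
        have := ih n h
        simp only [List.length_cons]
        intro hc
        apply this
        rw [hc, hn]
        push_cast
        ring
      · simp only [firstRun, if_neg hn] at h ⊢
        simp only [List.getD_cons_zero, List.length_nil, Nat.cast_zero]
        intro hc
        exact hn (by omega)

-- ---- A's groupby output is the runs decomposition ----

-- the ascending run s, s+1, …, p (for s ≤ p)
def ascRun (s p : Int) : List Int := (List.range (p - s + 1).toNat).map (fun j => s + (j : Int))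

theorem ascRun_self (s : Int) : ascRun s s = [s] := by
  have h : (s - s + 1).toNat = 1 := by omega
  simp [ascRun]

theorem ascRun_snoc (s p : Int) (h : s ≤ p + 1) : ascRun s (p + 1) = ascRun s p ++ [p + 1] := by
  have hL : (p + 1 - s + 1).toNat = (p - s + 1).toNat + 1 := by omega
  have hc : s + ((p - s + 1).toNat : Int) = p + 1 := by omega
  simp [ascRun, hL, List.range_succ]
  omega

theorem keyed_group (xs : List Int) : ∀ (i s p : Int), s ≤ p →
    groupAuxA (p - i) (ascRun s p).reverse (keyedFrom (i + 1) xs)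
      = (ascRun s p ++ (firstRun p xs).1) :: runsOf (firstRun p xs).2 := by
  induction xs with
  | nil =>
      intro i s p h
      have h1 : keyedFrom (i + 1) ([] : List Int) = [] := rfl
      have h2 : firstRun p ([] : List Int) = ([], []) := rfl
      rw [h1, h2]
      show [(ascRun s p).reverse.reverse] = (ascRun s p ++ []) :: runsOf []
      rw [List.reverse_reverse, List.append_nil, show runsOf [] = [] from by simp [runsOf]]
  | cons n rest ih =>
      intro i s p h
      simp only [keyedFrom, groupAuxA]
      by_cases hn : n = p + 1
      · have hkey : (n - (i + 1) == p - i) = true := by simp; omega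
        rw [if_pos hkey]
        have hcur : n :: (ascRun s p).reverse = (ascRun s n).reverse := by
          subst hn
          rw [ascRun_snoc s p (by omega)]
          simp
        have hkeq : p - i = n - (i + 1) := by omega
        rw [hcur, hkeq]
        rw [ih (i + 1) s n (by omega)]
        have hfr : firstRun p (n :: rest) =
            ((n :: (firstRun n rest).1, (firstRun n rest).2) : List Int × List Int) := by
          simp [firstRun, hn]
        rw [hfr]
        have : ascRun s n ++ (firstRun n rest).1 = ascRun s p ++ n :: (firstRun n rest).1 := by
          subst hn
          rw [ascRun_snoc s p (by omega)]
          simp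
        rw [this]
      · have hkey : ¬((n - (i + 1) == p - i) = true) := by simp; omega
        rw [if_neg hkey]
        have h1 : [n] = (ascRun n n).reverse := by rw [ascRun_self]; rfl
        rw [h1, ih (i + 1) n n le_rfl]
        have hfr : firstRun p (n :: rest) = (([], n :: rest) : List Int × List Int) := by
          simp [firstRun, hn]
        rw [hfr, ascRun_self]
        have hruns : runsOf (n :: rest) = (n :: (firstRun n rest).1) :: runsOf (firstRun n rest).2 := by
          simp [runsOf]
        simp [hruns]

theorem sol_eq_runs (xs : List Int) :
    solution xs = PySem.Str.join "," ((runsOf xs).map rangifyA) := by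
  cases xs with
  | nil =>
      rw [show runsOf [] = [] from by simp [runsOf]]
      rfl
  | cons x tl =>
      simp only [solution, keyedFrom]
      have hg := keyed_group tl 0 x x le_rfl
      rw [ascRun_self] at hg
      rw [show ([x] : List Int).reverse = [x] from rfl] at hg
      rw [hg]
      rw [show runsOf (x :: tl) = (x :: (firstRun x tl).1) :: runsOf (firstRun x tl).2 from
        by simp [runsOf]]
      rfl

-- ---- B's staged index computation, in Nat form ----

def predSN (xs : List Int) (i : Nat) : Bool :=
  i == 0 || !(xs.getD i 0 == xs.getD (i - 1) 0 + 1)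

def predEN (xs : List Int) (i : Nat) : Bool :=
  i == xs.length - 1 || !(xs.getD (i + 1) 0 == xs.getD i 0 + 1)

def fmtN (xs : List Int) (a b : Nat) : String :=
  if b - a > 1 then PySem.Int.toStr (xs.getD a 0) ++ "-" ++ PySem.Int.toStr (xs.getD b 0)
  else if b - a = 1 then PySem.Int.toStr (xs.getD a 0) ++ "," ++ PySem.Int.toStr (xs.getD b 0)
  else PySem.Int.toStr (xs.getD a 0)

def partsN (xs : List Int) : List String :=
  (((List.range xs.length).filter (predSN xs)).zip
     ((List.range xs.length).filter (predEN xs))).map (fun ab => fmtN xs ab.1 ab.2)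

theorem predSB_natCast (xs : List Int) (i : Nat) : predSB xs (i : Int) = predSN xs i := by
  cases i with
  | zero => simp [predSB, predSN]
  | succ k =>
      simp only [predSB, predSN, PySem.List.pyGetD_natCast]
      rw [show ((k + 1 : Nat) : Int) - 1 = ((k : Nat) : Int) from by push_cast; ring]
      rw [PySem.List.pyGetD_natCast]
      have hk : ((k : Int) + 1) ≠ 0 := by omega
      simp [hk]

theorem predEB_natCast (xs : List Int) (i : Nat) (hi : i < xs.length) :
    predEB xs (i : Int) = predEN xs i := by
  have h1 : ((i : Int) == (xs.length : Int) - 1) = (i == xs.length - 1) := by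
    by_cases h : i = xs.length - 1
    · subst h; simp; omega
    · have h' : ¬((i : Int) = (xs.length : Int) - 1) := by omega
      simp [h, h']
  have h2 : ((i : Int) + 1) = ((i + 1 : Nat) : Int) := by push_cast; ring
  simp only [predEB, predEN, h1, h2, PySem.List.pyGetD_natCast]

theorem fmtBI_natCast (xs : List Int) (a b : Nat) :
    fmtBI xs (a : Int) (b : Int) = fmtN xs a b := by
  simp only [fmtBI, fmtN, PySem.List.pyGetD_natCast]
  split_ifs <;> first | rfl | (exfalso; omega)

theorem alt_eq_partsN (xs : List Int) : solution_alt xs = PySem.Str.join "," (partsN xs) := by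
  have hstep : solution_alt xs = PySem.Str.join ","
      ((((PySem.List.pyRange 0 (xs.length : Int) 1).filter (predSB xs)).zip
         ((PySem.List.pyRange 0 (xs.length : Int) 1).filter (predEB xs))).foldl
        (fun ps ab => ps ++ [fmtBI xs ab.1 ab.2]) []) := rfl
  have hS : List.filter (predSB xs ∘ fun k : Nat => (k : Int)) (List.range xs.length)
      = List.filter (predSN xs) (List.range xs.length) :=
    List.filter_congr (fun i _ => predSB_natCast xs i)
  have hE : List.filter (predEB xs ∘ fun k : Nat => (k : Int)) (List.range xs.length)
      = List.filter (predEN xs) (List.range xs.length) :=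
    List.filter_congr (fun i hi => predEB_natCast xs i (List.mem_range.mp hi))
  rw [hstep, PySem.List.pyRange_zero_natCast, List.filter_map, List.filter_map, hS, hE,
      List.zip_map, PySem.List.foldl_append_singleton_eq_map, List.nil_append, List.map_map]
  unfold partsN
  congr 1
  apply List.map_congr_left
  intro ab _
  cases ab with
  | mk a b => exact fmtBI_natCast xs a b

-- ---- index arithmetic on the split list ----

theorem runGetD (x : Int) (r t : List Int)
    (hget : ∀ j, j < r.length → r.getD j 0 = x + 1 + (j : Int)) :
    ∀ j, j < r.length + 1 → ((x :: r) ++ t).getD j 0 = x + (j : Int) := by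
  intro j hj
  rw [List.cons_append]
  cases j with
  | zero => simp
  | succ k =>
      rw [List.getD_cons_succ]
      rw [List.getD_append r t 0 k (by omega)]
      rw [hget k (by omega)]
      push_cast
      ring

theorem restGetD (x : Int) (r t : List Int) (j : Nat) :
    ((x :: r) ++ t).getD ((r.length + 1) + j) 0 = t.getD j 0 := by
  rw [List.getD_eq_getElem?_getD, List.getD_eq_getElem?_getD]
  rw [List.getElem?_append_right (by simp only [List.length_cons]; omega)]
  simp only [List.length_cons]
  rw [show (r.length + 1) + j - (r.length + 1) = j from by omega]

-- ---- decomposition of the index filters along the first run ----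

theorem starts_decomp (x : Int) (r t : List Int)
    (hget : ∀ j, j < r.length → r.getD j 0 = x + 1 + (j : Int))
    (hbd : t ≠ [] → t.getD 0 0 ≠ x + 1 + (r.length : Int)) :
    (List.range ((x :: r) ++ t).length).filter (predSN ((x :: r) ++ t))
      = 0 :: ((List.range t.length).filter (predSN t)).map (fun j => (r.length + 1) + j) := by
  have hG := runGetD x r t hget
  have hlen : ((x :: r) ++ t).length = (r.length + 1) + t.length := by
    simp only [List.cons_append, List.length_cons, List.length_append]
    omega
  rw [hlen, List.range_add, List.filter_append]
  have h0 : predSN ((x :: r) ++ t) 0 = true := by simp [predSN]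
  have hnil : List.filter (predSN ((x :: r) ++ t) ∘ Nat.succ) (List.range r.length) = [] := by
    apply List.filter_eq_nil_iff.mpr
    intro i hi
    have hi' := List.mem_range.mp hi
    have e1 : ((x :: r) ++ t).getD (i + 1) 0 = x + (i : Int) + 1 := by
      have hh := hG (i + 1) (by omega)
      omega
    have e2 : ((x :: r) ++ t).getD i 0 = x + (i : Int) := hG i (by omega)
    show ¬(predSN ((x :: r) ++ t) (i + 1) = true)
    simp only [predSN]
    rw [show (i + 1) - 1 = i from rfl]
    rw [e1, e2]
    simp
  have hpt : List.filter (predSN ((x :: r) ++ t) ∘ fun j => (r.length + 1) + j)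
      (List.range t.length) = List.filter (predSN t) (List.range t.length) := by
    apply List.filter_congr
    intro j hj
    have hj' := List.mem_range.mp hj
    show predSN ((x :: r) ++ t) ((r.length + 1) + j) = predSN t j
    cases j with
    | zero =>
        have ht : t ≠ [] := by
          intro hteq
          rw [hteq] at hj'
          simp at hj'
        have g0 : ((x :: r) ++ t).getD ((r.length + 1) + 0) 0 = t.getD 0 0 := restGetD x r t 0
        have g1 : ((x :: r) ++ t).getD (((r.length + 1) + 0) - 1) 0 = x + (r.length : Int) := by
          rw [show ((r.length + 1) + 0) - 1 = r.length from by omega]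
          exact hG r.length (by omega)
        have hb : (t.getD 0 0 == x + (r.length : Int) + 1) = false := by
          have hbb := hbd ht
          simp only [beq_eq_false_iff_ne]
          omega
        simp only [predSN]
        rw [g0, g1, hb]
        simp
    | succ k =>
        have g0 : ((x :: r) ++ t).getD ((r.length + 1) + (k + 1)) 0 = t.getD (k + 1) 0 :=
          restGetD x r t (k + 1)
        have g1 : ((x :: r) ++ t).getD (((r.length + 1) + (k + 1)) - 1) 0 = t.getD k 0 := by
          rw [show ((r.length + 1) + (k + 1)) - 1 = (r.length + 1) + k from by omega]
          exact restGetD x r t k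
        have c1 : ((r.length + 1) + (k + 1) == 0) = false := by
          simp only [beq_eq_false_iff_ne]
          omega
        simp only [predSN]
        rw [g0, g1, c1]
        simp
  rw [List.range_succ_eq_map, List.filter_cons, h0]
  rw [List.filter_map, hnil]
  simp only [List.map_nil]
  rw [List.filter_map, hpt]
  simp

theorem ends_decomp (x : Int) (r t : List Int)
    (hget : ∀ j, j < r.length → r.getD j 0 = x + 1 + (j : Int))
    (hbd : t ≠ [] → t.getD 0 0 ≠ x + 1 + (r.length : Int)) :
    (List.range ((x :: r) ++ t).length).filter (predEN ((x :: r) ++ t))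
      = r.length :: ((List.range t.length).filter (predEN t)).map (fun j => (r.length + 1) + j) := by
  have hG := runGetD x r t hget
  have hlen : ((x :: r) ++ t).length = (r.length + 1) + t.length := by
    simp only [List.cons_append, List.length_cons, List.length_append]
    omega
  rw [hlen, List.range_add, List.filter_append]
  have hnil : List.filter (predEN ((x :: r) ++ t)) (List.range r.length) = [] := by
    apply List.filter_eq_nil_iff.mpr
    intro i hi
    have hi' := List.mem_range.mp hi
    have hne : (i == ((x :: r) ++ t).length - 1) = false := by
      simp only [hlen, beq_eq_false_iff_ne]
      omega
    have e1 : ((x :: r) ++ t).getD (i + 1) 0 = x + (i : Int) + 1 := by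
      have hh := hG (i + 1) (by omega)
      omega
    have e2 : ((x :: r) ++ t).getD i 0 = x + (i : Int) := hG i (by omega)
    simp only [predEN]
    rw [hne, e1, e2]
    simp
  have hLtrue : predEN ((x :: r) ++ t) r.length = true := by
    by_cases hm : t = []
    · subst hm
      simp [predEN]
    · have hml : 0 < t.length := List.length_pos_of_ne_nil hm
      have g0 : ((x :: r) ++ t).getD (r.length + 1) 0 = t.getD 0 0 := by
        have hh := restGetD x r t 0
        rwa [Nat.add_zero] at hh
      have gL : ((x :: r) ++ t).getD r.length 0 = x + (r.length : Int) := hG r.length (by omega)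
      have hb : (t.getD 0 0 == x + (r.length : Int) + 1) = false := by
        have hbb := hbd hm
        simp only [beq_eq_false_iff_ne]
        omega
      simp only [predEN]
      rw [g0, gL, hb]
      simp
  have hone : List.filter (predEN ((x :: r) ++ t)) [r.length] = [r.length] := by
    rw [List.filter_cons, hLtrue]
    simp
  have hpt : List.filter (predEN ((x :: r) ++ t) ∘ fun j => (r.length + 1) + j)
      (List.range t.length) = List.filter (predEN t) (List.range t.length) := by
    apply List.filter_congr
    intro j hj
    have hj' := List.mem_range.mp hj
    show predEN ((x :: r) ++ t) ((r.length + 1) + j) = predEN t j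
    have g0 : ((x :: r) ++ t).getD ((r.length + 1) + j) 0 = t.getD j 0 := restGetD x r t j
    have g1 : ((x :: r) ++ t).getD ((r.length + 1) + j + 1) 0 = t.getD (j + 1) 0 := by
      rw [show (r.length + 1) + j + 1 = (r.length + 1) + (j + 1) from by omega]
      exact restGetD x r t (j + 1)
    by_cases hq : j = t.length - 1
    · have c1 : ((r.length + 1) + j == ((x :: r) ++ t).length - 1) = true := by
        simp only [hlen, beq_iff_eq]
        omega
      have c2 : (j == t.length - 1) = true := by
        simp only [beq_iff_eq]
        omega
      simp only [predEN]
      rw [c1, c2]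
      simp
    · have c1 : ((r.length + 1) + j == ((x :: r) ++ t).length - 1) = false := by
        simp only [hlen, beq_eq_false_iff_ne]
        omega
      have c2 : (j == t.length - 1) = false := by
        simp only [beq_eq_false_iff_ne]
        omega
      simp only [predEN]
      rw [c1, c2, g0, g1]
  rw [List.range_succ, List.filter_append, hnil, hone]
  rw [List.filter_map, hpt]
  rfl

-- ---- assembling one step of B's computation ----

theorem head_fmt (x : Int) (r t : List Int)
    (hget : ∀ j, j < r.length → r.getD j 0 = x + 1 + (j : Int)) :
    fmtN ((x :: r) ++ t) 0 r.length = rangifyA (x :: r) := by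
  have hx0 : ((x :: r) ++ t).getD 0 0 = x := by simp
  have hxL : ((x :: r) ++ t).getD r.length 0 = x + (r.length : Int) :=
    runGetD x r t hget r.length (by omega)
  have hlast : (x :: r).getLastD 0 = x + (r.length : Int) := by
    rw [List.getLastD_eq_getLast?, List.getLast?_eq_getElem?]
    simp only [List.length_cons, Nat.add_sub_cancel]
    rw [← List.getD_eq_getElem?_getD]
    have hh := runGetD x r [] hget r.length (by omega)
    rw [List.append_nil] at hh
    exact hh
  simp only [fmtN, rangifyA, Nat.sub_zero, hx0, hxL, List.headD_cons, hlast, List.length_cons]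
  split_ifs <;> first | rfl | (exfalso; omega)

theorem tail_fmt (x : Int) (r t : List Int) (a b : Nat) :
    fmtN ((x :: r) ++ t) ((r.length + 1) + a) ((r.length + 1) + b) = fmtN t a b := by
  simp only [fmtN, restGetD x r t a, restGetD x r t b]
  rw [show ((r.length + 1) + b) - ((r.length + 1) + a) = b - a from by omega]

theorem partsN_cons (x : Int) (tl : List Int) :
    partsN (x :: tl) = rangifyA (x :: (firstRun x tl).1) :: partsN (firstRun x tl).2 := by
  have hget : ∀ j, j < (firstRun x tl).1.length →
      (firstRun x tl).1.getD j 0 = x + 1 + (j : Int) :=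
    fun j hj => firstRun_get tl x j hj
  have hbd := firstRun_bound tl x
  have hsplit : x :: tl = (x :: (firstRun x tl).1) ++ (firstRun x tl).2 := by
    rw [List.cons_append, firstRun_append]
  rw [hsplit]
  unfold partsN
  rw [starts_decomp x _ _ hget hbd, ends_decomp x _ _ hget hbd]
  rw [List.zip_cons_cons, List.zip_map, List.map_cons]
  congr 1
  · exact head_fmt x _ _ hget
  · rw [List.map_map]
    apply List.map_congr_left
    intro ab _
    cases ab with
    | mk a b => exact tail_fmt x _ _ a b

theorem partsN_eq_runs (xs : List Int) : partsN xs = (runsOf xs).map rangifyA := by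
  induction xs using runsOf.induct with
  | case1 => simp [partsN, runsOf]
  | case2 x tl ih =>
      rw [partsN_cons]
      rw [show runsOf (x :: tl) = (x :: (firstRun x tl).1) :: runsOf (firstRun x tl).2 from
        by simp [runsOf]]
      rw [List.map_cons, ih]

-- ===== VERDICT (by name: the statement is the Claim_ definition above) =====
theorem solution_spec : Claim_equal_solution := by
  intro args _
  unfold Spec_solution
  rw [sol_eq_runs, alt_eq_partsN, partsN_eq_runs]
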